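-- pv_equiv track=rewrite | github.com/CatherineALSKFF/paralov-island-task | map_analysis.py | _uniform_viewports
-- ===== SOURCE A (Python) =====
-- from typing import List, Tuple, Dict
--
-- def _uniform_viewports(map_w: int, map_h: int,
--                        num_queries: int) -> List[Tuple[int, int, int, int]]:
--     """Fallback: tile the map uniformly."""
--     vp = 15
--     viewports = []
--     for y in range(0, map_h, 13):  # slight overlap
--         for x in range(0, map_w, 13):
--             vx = min(max(0, x), map_w - vp)
--             vy = min(max(0, y), map_h - vp)
--             viewports.append((vx, vy, vp, vp))
--
--     viewports = list(dict.fromkeys(viewports))  # deduplicate, preserve order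
--
--     # Repeat if needed
--     result = []
--     while len(result) < num_queries and viewports:
--         result.extend(viewports)
--     return result[:num_queries]
-- ===== SOURCE B (Python) =====
-- def _uniform_viewports(map_w: int, map_h: int, num_queries: int):
--     """Fallback: tile the map uniformly — each output tuple computed directly by
--     index arithmetic (no grid is built, nothing is deduplicated or repeated).
--
--     The distinct viewport origins along an axis of size s are min(13*t, s-15)
--     for t = 0 .. ceil(max(s-15, 0)/13); the deduped grid is row-major with ny
--     rows of nx such origins, and element i of the repeated-then-truncated
--     result is grid[i % (nx*ny)]."""
--     vp = 15
--     if map_w <= 0 or map_h <= 0: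
--         return []
--     cx, cy = map_w - vp, map_h - vp
--     nx = (max(cx, 0) + 12) // 13 + 1
--     ny = (max(cy, 0) + 12) // 13 + 1
--     L = nx * ny
--     return [(min(13 * ((i % L) % nx), cx), min(13 * ((i % L) // nx), cy), vp, vp)
--             for i in range(max(num_queries, 0))]
-- ===== Notes on version B (the rewrite author's own statement) =====
-- stated objective: faster
-- what changed: B never builds, deduplicates or repeats the tile grid: it derives a closed form for the i-th output tuple (the grid is ny rows of nx clamped origins min(13*t, side-15), and output i is grid[i mod nx*ny]) and emits each tuple directly by index arithmetic, whereas A materialises all W*H/169 tiles, hashes them through dict.fromkeys and repeat-extends a list.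
import Mathlib
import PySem

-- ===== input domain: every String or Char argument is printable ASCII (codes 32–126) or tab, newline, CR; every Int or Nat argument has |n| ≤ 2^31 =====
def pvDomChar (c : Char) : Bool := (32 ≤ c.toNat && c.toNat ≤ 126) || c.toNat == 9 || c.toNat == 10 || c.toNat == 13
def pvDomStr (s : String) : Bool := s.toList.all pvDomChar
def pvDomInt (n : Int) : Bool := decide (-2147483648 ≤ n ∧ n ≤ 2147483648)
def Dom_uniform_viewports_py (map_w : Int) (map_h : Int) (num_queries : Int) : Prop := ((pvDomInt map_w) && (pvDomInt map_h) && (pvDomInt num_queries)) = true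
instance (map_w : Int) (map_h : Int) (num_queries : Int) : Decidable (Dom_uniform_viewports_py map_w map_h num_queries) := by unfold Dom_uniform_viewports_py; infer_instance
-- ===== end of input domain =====

-- B replaces A's build-grid / dict.fromkeys-dedup / repeat-extend passes by a closed form
-- computing the i-th output tuple directly by index arithmetic; return values are proved equal
-- (measurably faster: B's work is proportional to num_queries only, not to the map area).

-- ===== PORT A =====
-- the 'while len(result) < num_queries and viewports: result.extend(viewports)' loop of A
def uvWhile (num_queries : Int) (viewports : List (Int × Int × Int × Int))
    (result : List (Int × Int × Int × Int)) : List (Int × Int × Int × Int) :=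
  if h : (result.length : Int) < num_queries ∧ viewports ≠ [] then
    uvWhile num_queries viewports (result ++ viewports)
  else result
termination_by (num_queries - result.length).toNat
decreasing_by
  obtain ⟨h1, h2⟩ := h
  have hv : 0 < viewports.length := List.length_pos_iff.mpr h2
  simp only [List.length_append, Nat.cast_add]
  omega

def uniform_viewports_py (map_w : Int) (map_h : Int) (num_queries : Int) :
    List (Int × Int × Int × Int) :=
  let vp : Int := 15
  let viewports : List (Int × Int × Int × Int) :=
    (PySem.List.pyRange 0 map_h 13).foldl (fun acc y =>
      (PySem.List.pyRange 0 map_w 13).foldl (fun acc2 x =>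
        acc2 ++ [(min (max 0 x) (map_w - vp), min (max 0 y) (map_h - vp), vp, vp)]) acc) []
  let viewports2 := PySem.List.dedup viewports
  let result := uvWhile num_queries viewports2 []
  PySem.List.slice result none (some num_queries)

-- ===== PORT B =====
def uniform_viewports_py_alt (map_w : Int) (map_h : Int) (num_queries : Int) :
    List (Int × Int × Int × Int) :=
  let vp : Int := 15
  if map_w ≤ 0 ∨ map_h ≤ 0 then [] else
  let cx := map_w - vp
  let cy := map_h - vp
  let nx := PySem.Int.floordiv (max cx 0 + 12) 13 + 1
  let ny := PySem.Int.floordiv (max cy 0 + 12) 13 + 1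
  let L := nx * ny
  (PySem.List.pyRange 0 (max num_queries 0) 1).map (fun i =>
    (min (13 * PySem.Int.mod (PySem.Int.mod i L) nx) cx,
     min (13 * PySem.Int.floordiv (PySem.Int.mod i L) nx) cy, vp, vp))

-- ===== PRECONDITION & SPEC =====
def Spec_uniform_viewports_py (map_w : Int) (map_h : Int) (num_queries : Int) (out : List (Int × Int × Int × Int)) : Prop := out = uniform_viewports_py_alt map_w map_h num_queries
instance (map_w : Int) (map_h : Int) (num_queries : Int) (out : List (Int × Int × Int × Int)) : Decidable (Spec_uniform_viewports_py map_w map_h num_queries out) := by unfold Spec_uniform_viewports_py; infer_instance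

-- ===== CLAIM (what is proved, stated in full; the proofs are below) =====
def Claim_equal_uniform_viewports_py : Prop := ∀ (map_w : Int) (map_h : Int) (num_queries : Int), Dom_uniform_viewports_py map_w map_h num_queries → Spec_uniform_viewports_py map_w map_h num_queries (uniform_viewports_py map_w map_h num_queries)

-- ===== LEMMAS AND PROOFS =====

-- first-occurrence dedup in head-recursive form, used to reason about PySem.List.dedup
def fdedup {α : Type} [BEq α] : List α → List α
  | [] => []
  | a :: l => a :: fdedup (l.filter (fun b => !(b == a)))
termination_by l => l.length
decreasing_by
  simp only [List.length_unattach]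
  exact Nat.lt_succ_of_le (le_trans (List.length_filter_le _ _) (le_of_eq (List.length_attach)))

theorem fdedup_cons {α : Type} [BEq α] (a : α) (l : List α) :
    fdedup (a :: l) = a :: fdedup (l.filter (fun b => !(b == a))) := by
  rw [fdedup]

theorem foldl_add_eq_fdedup {α : Type} [BEq α] [LawfulBEq α] (l : List α) (s : List α) :
    l.foldl PySem.Set.add s = s ++ fdedup (l.filter (fun b => !(s.contains b))) := by
  induction l generalizing s with
  | nil => simp [fdedup]
  | cons a l ih =>
    simp only [List.foldl_cons, List.filter_cons]
    by_cases hc : s.contains a = true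
    · have hadd : PySem.Set.add s a = s := by
        have hm : a ∈ s := by simpa using hc
        simp [PySem.Set.add, hm, hc]
      rw [hadd, ih, hc]
      simp
    · have hadd : PySem.Set.add s a = s ++ [a] := by
        have hm : a ∉ s := by simpa using hc
        simp [PySem.Set.add, hm, hc]
      rw [hadd, ih]
      rw [Bool.not_eq_true] at hc
      simp only [hc, Bool.not_false, if_pos, fdedup_cons, List.filter_filter,
        List.append_assoc, List.cons_append, List.nil_append]
      congr 3
      apply List.filter_congr
      intro b _
      simp only [List.contains_append, List.contains_cons, List.contains_nil]
      cases hba : (b == a) <;> cases hbs : s.contains b <;> simp [hba, hbs]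

theorem dedup_eq_fdedup {α : Type} [BEq α] [LawfulBEq α] (l : List α) :
    PySem.List.dedup l = fdedup l := by
  have h := foldl_add_eq_fdedup l []
  simp only [List.contains_nil, Bool.not_false, List.filter_true, List.nil_append] at h
  rw [← h, PySem.List.dedup_eq_ofList (xs := l)]
  rfl

theorem mem_fdedup {α : Type} [BEq α] [LawfulBEq α] (l : List α) (a : α) :
    a ∈ fdedup l ↔ a ∈ l := by
  rw [← dedup_eq_fdedup]; exact PySem.List.mem_dedup l a

theorem fdedup_map_inj {α β : Type} [BEq α] [LawfulBEq α] [BEq β] [LawfulBEq β] (f : α → β)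
    (hf : ∀ a a', f a = f a' → a = a') : ∀ (l : List α),
    fdedup (l.map f) = (fdedup l).map f
  | [] => by simp [fdedup]
  | a :: l => by
    rw [List.map_cons, fdedup_cons, fdedup_cons, List.map_cons]
    have hfl : (l.map f).filter (fun b => !(b == f a)) = (l.filter (fun b => !(b == a))).map f := by
      rw [List.filter_map]
      congr 1
      apply List.filter_congr
      intro b _
      simp only [Function.comp_apply]
      have hba : (f b == f a) = (b == a) := by
        cases hba : (b == a)
        · simp only [beq_eq_false_iff_ne] at hba ⊢
          exact fun h => hba (hf b a h)
        · simp only [beq_iff_eq] at hba ⊢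
          rw [hba]
      rw [hba]
    rw [hfl, fdedup_map_inj f hf (l.filter (fun b => !(b == a)))]
termination_by l => l.length
decreasing_by
  exact Nat.lt_succ_of_le (List.length_filter_le _ _)

theorem fdedup_append {α : Type} [BEq α] [LawfulBEq α] (l1 l2 : List α) :
    fdedup (l1 ++ l2) = fdedup l1 ++ fdedup (l2.filter (fun b => !(l1.contains b))) := by
  have h12 := foldl_add_eq_fdedup (l1 ++ l2) ([] : List α)
  simp only [List.contains_nil, Bool.not_false, List.filter_true, List.nil_append,
    List.foldl_append] at h12
  have h1 := foldl_add_eq_fdedup l1 ([] : List α)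
  simp only [List.contains_nil, Bool.not_false, List.filter_true, List.nil_append] at h1
  rw [h1, foldl_add_eq_fdedup] at h12
  rw [← h12]
  congr 2
  apply List.filter_congr
  intro b _
  simp [List.contains_eq_mem, mem_fdedup]

theorem flatMap_filter_blocks {α β γ : Type} [BEq α] [LawfulBEq α] [BEq γ] [LawfulBEq γ]
    (F : β → α → γ) (hF : ∀ x y x' y', F x y = F x' y' → x = x' ∧ y = y')
    (y : α) (ys : List α) (xs : List β) :
    (ys.flatMap fun y' => xs.map fun x => F x y').filter
        (fun t => !((xs.map fun x => F x y).contains t))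
      = (ys.filter (fun y' => !(y' == y))).flatMap fun y' => xs.map fun x => F x y' := by
  induction ys with
  | nil => simp
  | cons y' ys ih =>
    simp only [List.flatMap_cons, List.filter_append, List.filter_cons, ih]
    by_cases hy : y' = y
    · subst hy
      have hblock : ((xs.map fun x => F x y').filter
          (fun t => !((xs.map fun x => F x y').contains t))) = [] := by
        apply List.filter_eq_nil_iff.mpr
        intro t ht
        simp [ht]
      rw [hblock]
      simp
    · have hblock : ((xs.map fun x => F x y').filter
          (fun t => !((xs.map fun x => F x y).contains t))) = (xs.map fun x => F x y') := by
        apply List.filter_eq_self.mpr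
        intro t ht
        obtain ⟨x, hx, rfl⟩ := List.mem_map.mp ht
        simp only [Bool.not_eq_true', List.contains_eq_mem, decide_eq_false_iff_not]
        intro hmem
        obtain ⟨x', _, hx'⟩ := List.mem_map.mp hmem
        exact hy ((hF x' y x y' hx').2.symm)
      rw [hblock]
      have hyb : (y' == y) = false := by simp [hy]
      simp [hyb]

theorem fdedup_prod {α β γ : Type} [BEq α] [LawfulBEq α] [BEq β] [LawfulBEq β]
    [BEq γ] [LawfulBEq γ]
    (F : β → α → γ) (hF : ∀ x y x' y', F x y = F x' y' → x = x' ∧ y = y') :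
    ∀ (ys : List α) (xs : List β),
    fdedup (ys.flatMap fun y => xs.map fun x => F x y)
      = (fdedup ys).flatMap (fun y => (fdedup xs).map fun x => F x y)
  | [], _ => by simp [fdedup]
  | y :: ys, xs => by
    rw [List.flatMap_cons, fdedup_append, fdedup_cons, List.flatMap_cons]
    congr 1
    · exact fdedup_map_inj (fun x => F x y) (fun a a' h => (hF a y a' y h).1) xs
    · rw [flatMap_filter_blocks F hF y ys xs,
        fdedup_prod F hF (ys.filter (fun y' => !(y' == y))) xs]
termination_by ys _ => ys.length
decreasing_by
  exact Nat.lt_succ_of_le (List.length_filter_le _ _)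

theorem fdedup_eq_self_of_nodup {α : Type} [BEq α] [LawfulBEq α] :
    ∀ (l : List α), l.Nodup → fdedup l = l
  | [], _ => by simp [fdedup]
  | a :: l, h => by
    rw [fdedup_cons]
    have hf : l.filter (fun b => !(b == a)) = l := by
      apply List.filter_eq_self.mpr
      intro b hb
      have hba : b ≠ a := fun he => (List.nodup_cons.mp h).1 (he ▸ hb)
      simp [hba]
    rw [hf, fdedup_eq_self_of_nodup l (List.nodup_cons.mp h).2]

theorem fdedup_append_replicate {α : Type} [BEq α] [LawfulBEq α]
    (l : List α) (m : Nat) (a : α) (ha : a ∈ l) :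
    fdedup (l ++ List.replicate m a) = fdedup l := by
  rw [fdedup_append]
  have hnil : (List.replicate m a).filter (fun b => !(l.contains b)) = [] := by
    apply List.filter_eq_nil_iff.mpr
    intro b hb
    rw [List.eq_of_mem_replicate hb]
    simp [ha]
  rw [hnil]
  simp [fdedup]

-- the deduplicated 1-D tiling of an axis of size 0 < w is exactly
-- min(13*t, w-15) for t = 0 .. ceil(max(w-15,0)/13)
theorem axis_dedup (w : Int) (hw : 0 < w) :
    PySem.List.dedup ((PySem.List.pyRange 0 w 13).map (fun x => min x (w - 15)))
      = (List.range (PySem.Int.floordiv (max (w - 15) 0 + 12) 13 + 1).toNat).map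
          (fun t : Nat => min (13 * (t : Int)) (w - 15)) := by
  have h13 : (0:Int) < 13 := by norm_num
  rw [PySem.Int.floordiv_eq_ediv_of_pos h13]
  rw [PySem.List.pyRange_of_pos 0 w h13, if_pos hw, List.map_map]
  have hfun : ((fun x => min x (w - 15)) ∘ fun k : Nat => 0 + 13 * (k:Int))
      = fun k : Nat => min (13 * (k:Int)) (w - 15) := by
    funext k; simp
  rw [hfun]
  set c := w - 15 with hc
  set nN := ((max c 0 + 12) / 13 + 1).toNat with hn
  set n := ((w - 0 + 13 - 1) / 13).toNat with hm
  have hle : nN ≤ n := by omega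
  have hsplit : List.range n = List.range nN ++ (List.range (n - nN)).map (fun x => nN + x) := by
    rw [← List.range_add]
    congr 1
    omega
  rw [hsplit, List.map_append]
  have hrep : ((List.range (n - nN)).map (fun x => nN + x)).map
      (fun k : Nat => min (13 * (k:Int)) c) = List.replicate (n - nN) c := by
    rw [List.map_map]
    apply List.eq_replicate_iff.mpr
    refine ⟨by simp, ?_⟩
    intro b hb
    obtain ⟨x, hx, rfl⟩ := List.mem_map.mp hb
    simp only [Function.comp_apply]
    omega
  rw [hrep]
  have hmem : c ∈ (List.range nN).map (fun k : Nat => min (13 * (k:Int)) c) := by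
    apply List.mem_map.mpr
    refine ⟨nN - 1, List.mem_range.mpr (by omega), by omega⟩
  have hnd : ((List.range nN).map (fun k : Nat => min (13 * (k:Int)) c)).Nodup := by
    apply List.Nodup.map_on _ List.nodup_range
    intro t ht t' ht' heq
    have ht1 := List.mem_range.mp ht
    have ht2 := List.mem_range.mp ht'
    omega
  rw [dedup_eq_fdedup, fdedup_append_replicate _ _ _ hmem, fdedup_eq_self_of_nodup _ hnd]

def joinRep (m : Nat) (V : List (Int × Int × Int × Int)) : List (Int × Int × Int × Int) :=
  (List.replicate m V).flatten

theorem joinRep_succ (m : Nat) (V : List (Int × Int × Int × Int)) :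
    joinRep (m + 1) V = V ++ joinRep m V := by
  simp [joinRep, List.replicate_succ]

theorem uvWhile_joinRep (num_queries : Int) (V : List (Int × Int × Int × Int)) (hV : V ≠ [])
    (r : List (Int × Int × Int × Int)) :
    ∃ t : Nat, uvWhile num_queries V r = r ++ joinRep t V ∧
      num_queries ≤ (r.length : Int) + ((t * V.length : Nat) : Int) := by
  rw [uvWhile]
  split
  · rename_i h
    obtain ⟨t, ht, hlen⟩ := uvWhile_joinRep num_queries V hV (r ++ V)
    refine ⟨t + 1, ?_, ?_⟩
    · rw [ht]; simp [joinRep, List.replicate_succ]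
    · simp only [List.length_append, Nat.cast_add] at hlen
      have he : ((t + 1) * V.length : Nat) = (t * V.length + V.length : Nat) := by ring
      rw [he]
      push_cast at hlen ⊢
      linarith
  · rename_i h
    refine ⟨0, by simp [joinRep], ?_⟩
    push_cast
    rcases not_and_or.mp h with h1 | h1
    · omega
    · exact absurd hV (by simpa using h1)
termination_by (num_queries - r.length).toNat
decreasing_by
  rename_i h
  obtain ⟨h1, h2⟩ := h
  have hv : 0 < V.length := List.length_pos_iff.mpr h2
  simp only [List.length_append, Nat.cast_add]
  omega

theorem joinRep_getElem? (m : Nat) (V : List (Int × Int × Int × Int)) (j : Nat)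
    (hj : j < m * V.length) :
    (joinRep m V)[j]? = V[j % V.length]? := by
  induction m generalizing j with
  | zero => simp at hj
  | succ k ih =>
    rw [joinRep_succ]
    by_cases hjV : j < V.length
    · rw [List.getElem?_append_left hjV, Nat.mod_eq_of_lt hjV]
    · have hge : V.length ≤ j := Nat.le_of_not_lt hjV
      have hL : 0 < V.length := by
        rcases Nat.eq_zero_or_pos V.length with h0 | h0
        · rw [h0] at hj; simp at hj
        · exact h0
      rw [List.getElem?_append_right hge]
      have hj' : j - V.length < k * V.length := by
        have he : (k + 1) * V.length = k * V.length + V.length := by ring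
        omega
      rw [ih (j - V.length) hj', Nat.mod_eq_sub_mod hge]

theorem flat_length {α γ : Type} (ys : List α) (m : Nat) (f : α → Nat → γ) :
    (ys.flatMap fun y => (List.range m).map (f y)).length = ys.length * m := by
  induction ys with
  | nil => simp
  | cons y ys ih =>
    rw [List.flatMap_cons, List.length_append, ih]
    simp
    ring

theorem flat_getElem? {α γ : Type} (ys : List α) (m : Nat) (f : α → Nat → γ) (j : Nat)
    (hm : 0 < m) (hj : j < ys.length * m) :
    (ys.flatMap fun y => (List.range m).map (f y))[j]?
      = some (f (ys[j / m]'((Nat.div_lt_iff_lt_mul hm).mpr hj)) (j % m)) := by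
  induction ys generalizing j with
  | nil => simp at hj
  | cons y ys ih =>
    rw [List.flatMap_cons]
    by_cases hjm : j < m
    · rw [List.getElem?_append_left (by simpa using hjm), List.getElem?_map,
        List.getElem?_range hjm]
      simp [Nat.div_eq_of_lt hjm, Nat.mod_eq_of_lt hjm]
    · have hge : m ≤ j := Nat.le_of_not_lt hjm
      rw [List.getElem?_append_right (by simpa using hge)]
      simp only [List.length_map, List.length_range]
      have hj' : j - m < ys.length * m := by
        have he : (ys.length + 1) * m = ys.length * m + m := by ring
        simp only [List.length_cons] at hj
        omega
      rw [ih (j - m) hj']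
      have hdiv : j / m = (j - m) / m + 1 := Nat.div_eq_sub_div hm hge
      have hmod : (j - m) % m = j % m := (Nat.mod_eq_sub_mod hge).symm
      congr 1
      rw [hmod]
      congr 1
      simp only [hdiv, List.getElem_cons_succ]

-- A's repeat-while tail equals take, for any nonempty viewport list and 0 < nq
theorem a_tail_take (nq : Int) (V : List (Int × Int × Int × Int)) (hV : V ≠ []) :
    ∃ t : Nat, PySem.List.slice (uvWhile nq V []) none (some nq)
        = (joinRep t V).take nq.toNat ∧ nq ≤ ((t * V.length : Nat) : Int) := by
  obtain ⟨t, ht, hlen⟩ := uvWhile_joinRep nq V hV []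
  simp only [List.nil_append, List.length_nil, Nat.cast_zero, zero_add] at ht hlen
  by_cases hnq : 0 ≤ nq
  · exact ⟨t, by rw [ht, PySem.List.slice_to _ hnq], hlen⟩
  · have hstop : uvWhile nq V [] = [] := by
      rw [uvWhile, dif_neg]
      simp only [List.length_nil, Nat.cast_zero, not_and]
      intro hcon
      omega
    have hjr : joinRep t V = [] := by rw [← ht, hstop]
    refine ⟨t, ?_, hlen⟩
    rw [ht, hjr]
    simp [PySem.List.slice, PySem.List.clampIdx]

-- ===== VERDICT (by name: the statement is the Claim_ definition above) =====
theorem uniform_viewports_py_spec : Claim_equal_uniform_viewports_py := by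
  intro map_w map_h num_queries _
  unfold Spec_uniform_viewports_py uniform_viewports_py uniform_viewports_py_alt
  simp only [PySem.List.foldl_append_singleton_eq_map, PySem.List.foldl_append_eq_flatMap,
    List.nil_append]
  by_cases hg : map_w ≤ 0 ∨ map_h ≤ 0
  · rw [if_pos hg]
    have hnil : ((PySem.List.pyRange 0 map_h 13).flatMap fun y =>
        (PySem.List.pyRange 0 map_w 13).map fun x =>
          (min (max 0 x) (map_w - 15), min (max 0 y) (map_h - 15), (15:Int), (15:Int))) = [] := by
      rcases hg with hg | hg
      · have hX : PySem.List.pyRange 0 map_w 13 = [] := by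
          rw [List.eq_nil_iff_forall_not_mem]
          intro x hx
          rw [PySem.List.mem_pyRange_iff_of_pos (by omega)] at hx
          omega
        rw [hX]
        simp
      · have hY : PySem.List.pyRange 0 map_h 13 = [] := by
          rw [List.eq_nil_iff_forall_not_mem]
          intro y hy
          rw [PySem.List.mem_pyRange_iff_of_pos (by omega)] at hy
          omega
        rw [hY]
        simp
    rw [hnil]
    have hd : PySem.List.dedup ([] : List (Int × Int × Int × Int)) = [] := by
      rw [dedup_eq_fdedup]; simp [fdedup]
    rw [hd, uvWhile]
    simp [PySem.List.slice, PySem.List.clampIdx]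
  · rw [if_neg hg]
    push_neg at hg
    obtain ⟨hw, hh⟩ := hg
    -- step 1: grid dedup = product of 1-D dedups
    have hprod :
        PySem.List.dedup ((PySem.List.pyRange 0 map_h 13).flatMap fun y =>
          (PySem.List.pyRange 0 map_w 13).map fun x =>
            (min (max 0 x) (map_w - 15), min (max 0 y) (map_h - 15), (15:Int), (15:Int)))
        = (PySem.List.dedup ((PySem.List.pyRange 0 map_h 13).map fun y => min y (map_h - 15))).flatMap
            (fun vy => (PySem.List.dedup ((PySem.List.pyRange 0 map_w 13).map fun x => min x (map_w - 15))).map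
              (fun vx => (vx, vy, (15:Int), (15:Int)))) := by
      have hstep : ((PySem.List.pyRange 0 map_h 13).flatMap fun y =>
          (PySem.List.pyRange 0 map_w 13).map fun x =>
            (min (max 0 x) (map_w - 15), min (max 0 y) (map_h - 15), (15:Int), (15:Int)))
          = (((PySem.List.pyRange 0 map_h 13).map fun y => min y (map_h - 15)).flatMap fun vy =>
              (((PySem.List.pyRange 0 map_w 13).map fun x => min x (map_w - 15)).map fun vx =>
                (vx, vy, (15:Int), (15:Int)))) := by
        rw [List.flatMap_map]
        apply List.flatMap_congr
        intro y hy
        have hy0 : 0 ≤ y := by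
          rw [PySem.List.mem_pyRange_iff_of_pos (by omega)] at hy; omega
        rw [List.map_map]
        apply List.map_congr_left
        intro x hx
        have hx0 : 0 ≤ x := by
          rw [PySem.List.mem_pyRange_iff_of_pos (by omega)] at hx; omega
        simp only [Function.comp_apply]
        rw [max_eq_right hx0, max_eq_right hy0]
      rw [hstep, dedup_eq_fdedup, dedup_eq_fdedup, dedup_eq_fdedup]
      exact fdedup_prod (fun vx vy => (vx, vy, (15:Int), (15:Int)))
        (fun x y x' y' h => by
          simp only [Prod.mk.injEq] at h
          exact ⟨h.1, h.2.1⟩) _ _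
    rw [hprod, axis_dedup map_w hw, axis_dedup map_h hh]
    -- abbreviations
    set cx := map_w - 15 with hcx
    set cy := map_h - 15 with hcy
    set nxI := PySem.Int.floordiv (max cx 0 + 12) 13 + 1 with hnxI
    set nyI := PySem.Int.floordiv (max cy 0 + 12) 13 + 1 with hnyI
    have h13 : (0:Int) < 13 := by norm_num
    have hnxpos : 0 < nxI := by
      rw [hnxI, PySem.Int.floordiv_eq_ediv_of_pos h13]; omega
    have hnypos : 0 < nyI := by
      rw [hnyI, PySem.Int.floordiv_eq_ediv_of_pos h13]; omega
    set nxN := nxI.toNat with hnxN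
    set nyN := nyI.toNat with hnyN
    have hcnx : (nxN : Int) = nxI := Int.toNat_of_nonneg (le_of_lt hnxpos)
    have hcny : (nyN : Int) = nyI := Int.toNat_of_nonneg (le_of_lt hnypos)
    have hnx0 : 0 < nxN := by omega
    have hny0 : 0 < nyN := by omega
    -- the grid in flatMap-of-range form
    have hV : ((List.range nyN).map (fun t : Nat => min (13 * (t:Int)) cy)).flatMap
        (fun vy => ((List.range nxN).map (fun t : Nat => min (13 * (t:Int)) cx)).map
          (fun vx => (vx, vy, (15:Int), (15:Int))))
        = (List.range nyN).flatMap (fun s : Nat => (List.range nxN).map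
            (fun t : Nat => (min (13 * (t:Int)) cx, min (13 * (s:Int)) cy, (15:Int), (15:Int)))) := by
      rw [List.flatMap_map]
      apply List.flatMap_congr
      intro s _
      rw [List.map_map]
      rfl
    rw [hV]
    set V := (List.range nyN).flatMap (fun s : Nat => (List.range nxN).map
        (fun t : Nat => (min (13 * (t:Int)) cx, min (13 * (s:Int)) cy, (15:Int), (15:Int)))) with hVdef
    have hVlen : V.length = nyN * nxN := by
      rw [hVdef, flat_length]
      simp
    have hVne : V ≠ [] := by
      intro h0
      rw [h0] at hVlen
      simp at hVlen
      omega
    obtain ⟨t, ht, hlen⟩ := a_tail_take num_queries V hVne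
    rw [ht]
    -- B side to range form
    rw [PySem.List.pyRange_one]
    set K := (max num_queries 0).toNat with hK
    have hK0 : (max num_queries 0 - 0).toNat = K := by omega
    rw [hK0, List.map_map]
    apply List.ext_getElem?
    intro i
    by_cases hiK : i < K
    · have hKle : K ≤ t * V.length := by omega
      have hiV : i < t * V.length := lt_of_lt_of_le hiK hKle
      rw [List.getElem?_take, if_pos (by omega), joinRep_getElem? t V i hiV, hVlen]
      have hiL : i % (nyN * nxN) < nyN * nxN := Nat.mod_lt _ (Nat.mul_pos hny0 hnx0)
      rw [hVdef, flat_getElem? _ _ _ _ hnx0 (by simpa using hiL), List.getElem?_map,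
        List.getElem?_range hiK]
      simp only [Option.map_some, Function.comp_apply, List.getElem_range]
      congr 1
      have hLval : nxI * nyI = ((nyN * nxN : Nat) : Int) := by
        push_cast
        rw [hcnx, hcny]
        ring
      have hLpos : (0:Int) < nxI * nyI := mul_pos hnxpos hnypos
      have hmod1 : PySem.Int.mod ((0:Int) + (i:Int)) (nxI * nyI)
          = ((i % (nyN * nxN) : Nat) : Int) := by
        rw [PySem.Int.mod_eq_emod_of_pos hLpos, hLval, Int.natCast_mod]
        norm_num
      rw [hmod1]
      have hmod2 : PySem.Int.mod ((i % (nyN * nxN) : Nat) : Int) nxI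
          = (((i % (nyN * nxN)) % nxN : Nat) : Int) := by
        rw [PySem.Int.mod_eq_emod_of_pos hnxpos, ← hcnx]
        norm_cast
      have hdiv2 : PySem.Int.floordiv ((i % (nyN * nxN) : Nat) : Int) nxI
          = (((i % (nyN * nxN)) / nxN : Nat) : Int) := by
        rw [PySem.Int.floordiv_eq_ediv_of_pos hnxpos, ← hcnx]
        norm_cast
      rw [hmod2, hdiv2]
    · have hle1 : ((joinRep t V).take num_queries.toNat).length ≤ i := by
        rw [List.length_take]
        omega
      rw [List.getElem?_eq_none hle1, List.getElem?_eq_none (by simpa using not_lt.mp hiK)]
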